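-- pv_equiv track=rewrite | github.com/tuffy/python-audio-tools | audiotools/__init__.py | iter_last
-- ===== SOURCE A (Python) =====
-- def iter_last(iterator):
--     """yields a (is_last, item) per item in the iterator
--
--     where is_last indicates whether the item is the final one
--
--     if the iterator has no items, yields (True, None)
--     """
--
--     iterator = iter(iterator)
--
--     try:
--         cached_item = next(iterator)
--     except StopIteration:
--         return
--
--     while True:
--         try:
--             next_item = next(iterator)
--             yield (False, cached_item)
--             cached_item = next_item
--         except StopIteration:
--             yield (True, cached_item)
--             return
-- ===== SOURCE B (Python) =====
-- def iter_last(iterator):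
--     """yields a (is_last, item) per item in the iterator,
--     is_last marking the final item; empty input yields nothing"""
--     items = list(iterator)
--     n = len(items)
--     for i, item in enumerate(items):
--         yield (i == n - 1, item)
-- ===== Notes on version B (the rewrite author's own statement) =====
-- stated objective: alternative
-- what changed: Replaced A's streaming one-pass lookahead (prefetch next() inside try/except, O(1) state) by a staged two-pass version: materialize the iterator into a list, take its length, then emit (i == n-1, item) by index comparison over enumerate.
import Mathlib
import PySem

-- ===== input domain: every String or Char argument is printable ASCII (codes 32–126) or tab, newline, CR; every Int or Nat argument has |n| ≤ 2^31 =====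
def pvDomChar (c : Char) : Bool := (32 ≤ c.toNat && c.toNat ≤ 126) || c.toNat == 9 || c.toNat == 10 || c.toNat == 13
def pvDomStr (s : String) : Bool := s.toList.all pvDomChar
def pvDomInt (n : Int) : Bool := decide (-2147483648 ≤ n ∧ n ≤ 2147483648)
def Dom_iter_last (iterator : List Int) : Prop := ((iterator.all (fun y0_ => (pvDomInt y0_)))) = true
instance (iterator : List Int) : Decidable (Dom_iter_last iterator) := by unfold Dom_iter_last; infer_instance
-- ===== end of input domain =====

-- B replaces A's streaming lookahead generator by a staged materialize-then-index pass (objective: alternative).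

-- ===== PORT A =====
-- A prefetches the next item: while a next item exists it yields (False, cached) and
-- advances; on StopIteration it yields (True, cached). Empty input yields nothing.
def iterLastLoopA (cached : Int) : List Int → List (Bool × Int)
  | [] => [(true, cached)]
  | nxt :: rest => (false, cached) :: iterLastLoopA nxt rest

def iter_last (iterator : List Int) : List (Bool × Int) :=
  match iterator with
  | [] => []
  | x :: xs => iterLastLoopA x xs

-- ===== PORT B =====
-- B: materialize the list, take its length n, then yield (i == n-1, item) per enumerated item.
def iter_last_alt (iterator : List Int) : List (Bool × Int) :=
  let items := iterator
  let n : Int := items.length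
  (PySem.List.enumerate items).map (fun p => (p.1 == n - 1, p.2))

-- ===== PRECONDITION & SPEC =====
def Spec_iter_last (iterator : List Int) (out : List (Bool × Int)) : Prop := out = iter_last_alt iterator
instance (iterator : List Int) (out : List (Bool × Int)) : Decidable (Spec_iter_last iterator out) := by unfold Spec_iter_last; infer_instance

-- ===== CLAIM (what is proved, stated in full; the proofs are below) =====
def Claim_equal_iter_last : Prop := ∀ (iterator : List Int), Dom_iter_last iterator → Spec_iter_last iterator (iter_last iterator)

-- ===== LEMMAS AND PROOFS =====
theorem iterLastLoopA_eq_enumerate (xs : List Int) (c : Int) (s : Int) :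
    iterLastLoopA c xs
      = (PySem.List.enumerate (c :: xs) s).map (fun p => (p.1 == s + xs.length, p.2)) := by
  induction xs generalizing c s with
  | nil =>
      simp [iterLastLoopA, PySem.List.enumerate_cons, PySem.List.enumerate_nil]
  | cons x rest ih =>
      have hne : (s == s + (rest.length + 1 : Int)) = false := by
        simp; omega
      calc iterLastLoopA c (x :: rest)
          = (false, c) :: iterLastLoopA x rest := rfl
        _ = (false, c) :: (PySem.List.enumerate (x :: rest) (s + 1)).map
              (fun p => (p.1 == (s + 1) + rest.length, p.2)) := by rw [ih]
        _ = _ := by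
            simp only [PySem.List.enumerate_cons, List.map_cons, List.length_cons]
            push_cast
            rw [show s + ((rest.length : Int) + 1) = s + 1 + (rest.length : Int) by ring]
            rw [show (s == s + 1 + (rest.length : Int)) = false by simpa using by omega]

-- ===== VERDICT (by name: the statement is the Claim_ definition above) =====
theorem iter_last_spec : Claim_equal_iter_last := by
  intro iterator _
  unfold Spec_iter_last iter_last iter_last_alt
  cases iterator with
  | nil => simp [PySem.List.enumerate_nil]
  | cons x xs =>
      have h := iterLastLoopA_eq_enumerate xs x 0
      simp only [List.length_cons] at *
      rw [h]
      push_cast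
      congr 1
      funext p
      congr 2
      omega
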